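-- pv_equiv track=rewrite | github.com/isabelarocha1/castro-marim-scripts | sequencias_sanger.py | trim_por_qualidade
-- ===== SOURCE A (Python) =====
-- def trim_por_qualidade(seq, qual, limite=20):
--     inicio = 0
--     fim = len(seq)
--
--     while inicio < fim and qual[inicio] < limite:
--         inicio += 1
--     while fim > inicio and qual[fim - 1] < limite:
--         fim -= 1
--     return seq[inicio:fim]
-- ===== SOURCE B (Python) =====
-- def trim_por_qualidade(seq, qual, limite=20):
--     good = [i for i in range(len(seq)) if qual[i] >= limite]
--     if not good:
--         return seq[0:0]
--     return seq[good[0]:good[-1] + 1]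
-- ===== Notes on version B (the rewrite author's own statement) =====
-- stated objective: alternative
-- what changed: Replaces A's two end-anchored while loops with a single scan that collects the good indices and returns the closed-form slice seq[first_good:last_good+1] (empty slice when none are good).
import Mathlib
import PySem

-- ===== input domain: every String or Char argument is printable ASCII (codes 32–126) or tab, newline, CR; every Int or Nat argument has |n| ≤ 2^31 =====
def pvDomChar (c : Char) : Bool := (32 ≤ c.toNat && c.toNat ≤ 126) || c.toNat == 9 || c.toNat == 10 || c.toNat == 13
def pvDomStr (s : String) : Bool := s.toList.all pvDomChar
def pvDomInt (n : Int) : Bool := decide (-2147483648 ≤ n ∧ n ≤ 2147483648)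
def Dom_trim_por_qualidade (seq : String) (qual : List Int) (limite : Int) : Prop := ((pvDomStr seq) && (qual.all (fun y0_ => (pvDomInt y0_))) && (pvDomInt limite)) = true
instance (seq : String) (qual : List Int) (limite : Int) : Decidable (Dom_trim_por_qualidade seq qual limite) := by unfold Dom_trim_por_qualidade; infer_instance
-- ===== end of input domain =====

-- B replaces A's two end-anchored while loops with one scan collecting the good
-- indices and a closed-form slice seq[first_good:last_good+1] (objective: alternative).

-- ===== PORT A =====
-- first while loop: advance `inicio` while qual[inicio] < limite
def pvTrimInicio (qual : List Int) (limite fim inicio : Int) : Int :=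
  if _h : inicio < fim then
    match PySem.List.pyGet? qual inicio with
    | some q => if q < limite then pvTrimInicio qual limite fim (inicio + 1) else inicio
    | none => inicio   -- Python raises IndexError here (outside Pre_)
  else inicio
termination_by (fim - inicio).toNat
decreasing_by omega

-- second while loop: retreat `fim` while qual[fim-1] < limite
def pvTrimFim (qual : List Int) (limite inicio fim : Int) : Int :=
  if _h : inicio < fim then
    match PySem.List.pyGet? qual (fim - 1) with
    | some q => if q < limite then pvTrimFim qual limite inicio (fim - 1) else fim
    | none => fim      -- Python raises IndexError here (outside Pre_)
  else fim
termination_by (fim - inicio).toNat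
decreasing_by omega

def trim_por_qualidade (seq : String) (qual : List Int) (limite : Int) : String :=
  let inicio := pvTrimInicio qual limite (PySem.Str.len seq) 0
  let fim := pvTrimFim qual limite inicio (PySem.Str.len seq)
  PySem.Str.slice seq (some inicio) (some fim)

-- ===== PORT B =====
def trim_por_qualidade_alt (seq : String) (qual : List Int) (limite : Int) : String :=
  let good := (PySem.List.pyRange 0 (PySem.Str.len seq)).filter
                (fun i => decide (limite ≤ PySem.List.pyGetD qual i 0))
  if good.isEmpty then PySem.Str.slice seq (some 0) (some 0)
  else PySem.Str.slice seq (some (PySem.List.pyGetD good 0 0))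
                          (some (PySem.List.pyGetD good (-1) 0 + 1))

-- ===== PRECONDITION & SPEC =====
-- Pre_ excludes exactly the inputs where Python A raises IndexError:
-- a nonempty seq with fewer quality values than characters.
def Pre_trim_por_qualidade (seq : String) (qual : List Int) (_limite : Int) : Prop :=
  seq.toList = [] ∨ seq.toList.length ≤ qual.length
instance (seq : String) (qual : List Int) (limite : Int) : Decidable (Pre_trim_por_qualidade seq qual limite) := by unfold Pre_trim_por_qualidade; infer_instance

def pvWitness_trim_por_qualidade : String × List Int × Int := ("ab", ([5, 30], 20))

def Spec_trim_por_qualidade (seq : String) (qual : List Int) (limite : Int) (out : String) : Prop := out = trim_por_qualidade_alt seq qual limite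
instance (seq : String) (qual : List Int) (limite : Int) (out : String) : Decidable (Spec_trim_por_qualidade seq qual limite out) := by unfold Spec_trim_por_qualidade; infer_instance

-- ===== CLAIM (what is proved, stated in full; the proofs are below) =====
def Claim_equal_trim_por_qualidade : Prop := ∀ (seq : String) (qual : List Int) (limite : Int), Dom_trim_por_qualidade seq qual limite → Pre_trim_por_qualidade seq qual limite → Spec_trim_por_qualidade seq qual limite (trim_por_qualidade seq qual limite)

-- ===== LEMMAS AND PROOFS =====

-- the per-index "good" predicate, on Nat indices
def pvGood (qual : List Int) (limite : Int) (k : Nat) : Bool :=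
  decide (limite ≤ qual[k]?.getD 0)

lemma pvPyGet?_lt (l : List Int) (k : Nat) (h : k < l.length) :
    PySem.List.pyGet? l (k : Int) = some (l[k]?.getD 0) := by
  rw [PySem.List.pyGet?_natCast]
  simp [List.getElem?_eq_getElem h]

-- the first loop returns the first good index in [start, start+k), else start+k
lemma pvTrimInicio_eq (qual : List Int) (limite : Int) (k start : Nat)
    (hq : start + k ≤ qual.length) :
    pvTrimInicio qual limite ((start + k : Nat) : Int) (start : Int) =
      ((List.range' start k).find? (pvGood qual limite)).elim
        ((start + k : Nat) : Int) (fun i => (i : Int)) := by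
  induction k generalizing start with
  | zero => rw [pvTrimInicio]; simp
  | succ k ih =>
    rw [pvTrimInicio]
    have hlt : (start : Int) < ((start + (k + 1) : Nat) : Int) := by push_cast; omega
    rw [dif_pos hlt, pvPyGet?_lt qual start (by omega)]
    rw [List.range'_succ, List.find?_cons]
    dsimp only
    by_cases hp : limite ≤ qual[start]?.getD 0
    · have hgb : pvGood qual limite start = true := by simp [pvGood, hp]
      rw [hgb, if_neg (by omega)]
      simp
    · have hgb : pvGood qual limite start = false := by simp [pvGood, hp]
      rw [hgb, if_pos (by omega)]
      have hc1 : ((start + (k + 1) : Nat) : Int) = (((start + 1) + k : Nat) : Int) := by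
        push_cast; ring
      have hc2 : (start : Int) + 1 = ((start + 1 : Nat) : Int) := by push_cast; ring
      rw [hc1, hc2, ih (start + 1) (by omega)]

-- the second loop returns (last good index in [start, start+k)) + 1, else start
lemma pvTrimFim_eq (qual : List Int) (limite : Int) (k start : Nat)
    (hq : start + k ≤ qual.length) :
    pvTrimFim qual limite (start : Int) ((start + k : Nat) : Int) =
      (((List.range' start k).filter (pvGood qual limite)).getLast?).elim
        (start : Int) (fun j => (j : Int) + 1) := by
  induction k with
  | zero => rw [pvTrimFim]; simp
  | succ k ih =>
    rw [pvTrimFim]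
    have hlt : (start : Int) < ((start + (k + 1) : Nat) : Int) := by push_cast; omega
    have hidx : ((start + (k + 1) : Nat) : Int) - 1 = ((start + k : Nat) : Int) := by
      push_cast; omega
    rw [dif_pos hlt, hidx, pvPyGet?_lt qual (start + k) (by omega)]
    rw [List.range'_concat, List.filter_append, List.getLast?_append]
    dsimp only
    by_cases hp : limite ≤ qual[start + k]?.getD 0
    · rw [if_neg (by omega)]
      have h1 : List.filter (pvGood qual limite) [start + 1 * k] = [start + k] := by
        simp [pvGood, hp]
      rw [h1]
      simp only [List.getLast?_singleton]
      simp
      omega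
    · rw [if_pos (by omega)]
      have h1 : List.filter (pvGood qual limite) [start + 1 * k] = [] := by
        simp [pvGood, hp]
      rw [h1]
      simp only [List.getLast?_nil, Option.none_or]
      exact ih (by omega)

-- B's good list is A's Nat-level good list, cast to Int
lemma pvGoodList_eq (seq : String) (qual : List Int) (limite : Int) :
    (PySem.List.pyRange 0 (PySem.Str.len seq)).filter
        (fun i => decide (limite ≤ PySem.List.pyGetD qual i 0)) =
      ((List.range seq.toList.length).filter (pvGood qual limite)).map (fun k : Nat => (k : Int)) := by
  rw [PySem.Str.len, PySem.List.pyRange_zero_natCast, List.filter_map]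
  exact congrArg (List.map fun k : Nat => ((k : Int)))
    (List.filter_congr (fun k _ => by
      simp [Function.comp, pvGood, PySem.List.pyGetD_natCast, List.getD_eq_getElem?_getD]))

-- ===== VERDICT (by name: the statement is the Claim_ definition above) =====
theorem trim_por_qualidade_spec : Claim_equal_trim_por_qualidade := by
  intro seq qual limite _hdom hpre
  unfold Spec_trim_por_qualidade
  simp only [trim_por_qualidade, trim_por_qualidade_alt]
  rw [pvGoodList_eq]
  set n := seq.toList.length with hn
  have hlen : PySem.Str.len seq = (n : Int) := by rw [PySem.Str.len]
  rcases Nat.eq_zero_or_pos n with h0 | hpos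
  · -- empty sequence: both sides are seq[0:0]
    have hA1 : pvTrimInicio qual limite (PySem.Str.len seq) 0 = 0 := by
      rw [hlen, h0, pvTrimInicio]; simp
    have hA2 : pvTrimFim qual limite 0 (PySem.Str.len seq) = 0 := by
      rw [hlen, h0, pvTrimFim]; simp
    rw [hA1, hA2, h0]
    simp
  · have hq : n ≤ qual.length := by
      rcases hpre with h | h
      · exfalso
        have h0 : seq.toList.length = 0 := by rw [h]; rfl
        omega
      · exact h
    have hI : pvTrimInicio qual limite (PySem.Str.len seq) 0 =
        ((List.range n).find? (pvGood qual limite)).elim ((n : Int)) (fun i => (i : Int)) := by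
      rw [hlen]
      have := pvTrimInicio_eq qual limite n 0 (by omega)
      simpa [List.range_eq_range'] using this
    rcases hf : (List.range n).find? (pvGood qual limite) with _ | i0
    · -- no good index: A returns seq[n:n], B returns seq[0:0], both empty
      have hfil : (List.range n).filter (pvGood qual limite) = [] := by
        rw [List.filter_eq_nil_iff]
        intro a ha
        exact (List.find?_eq_none.mp hf) a ha
      rw [hfil]
      have hF : pvTrimFim qual limite ((n : Int)) (PySem.Str.len seq) = (n : Int) := by
        rw [hlen]
        have := pvTrimFim_eq qual limite 0 n (by omega)
        simpa using this
      rw [hI, hf]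
      simp only [Option.elim, hF]
      simp [PySem.Str.slice, PySem.Chars.slice_eq_listSlice, PySem.List.slice,
        PySem.List.clampIdx, hn]
    · -- good indices exist: both return seq[i0 : last+1]
      have hi0mem : i0 ∈ List.range n := List.mem_of_find?_eq_some hf
      have hi0lt : i0 < n := List.mem_range.mp hi0mem
      have hi0p : pvGood qual limite i0 = true := List.find?_some hf
      -- split range n at i0; everything before i0 is bad
      have hsplit : List.range n = List.range' 0 i0 ++ List.range' i0 (n - i0) := by
        have h' : i0 + (n - i0) = n := by omega
        rw [List.range_eq_range', ← h']
        have := @List.range'_append 0 i0 (n - i0) 1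
        simpa using this.symm
      have hpre_none : (List.range' 0 i0).find? (pvGood qual limite) = none := by
        rcases hx : (List.range' 0 i0).find? (pvGood qual limite) with _ | x
        · rfl
        · exfalso
          have hmem := List.mem_of_find?_eq_some hx
          have hxlt : x < i0 := by
            rcases List.mem_range'.mp hmem with ⟨t, ht, rfl⟩; omega
          have : (List.range n).find? (pvGood qual limite) = some x := by
            rw [hsplit, List.find?_append, hx]; rfl
          rw [hf] at this
          injection this with h'
          omega
      have hfil : (List.range n).filter (pvGood qual limite) =
          (List.range' i0 (n - i0)).filter (pvGood qual limite) := by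
        rw [hsplit, List.filter_append]
        have : (List.range' 0 i0).filter (pvGood qual limite) = [] := by
          rw [List.filter_eq_nil_iff]
          intro a ha
          exact (List.find?_eq_none.mp hpre_none) a ha
        rw [this, List.nil_append]
      -- the suffix filter is nonempty: it contains i0 as head
      have hfind_suf : (List.range' i0 (n - i0)).find? (pvGood qual limite) = some i0 := by
        have : (List.range n).find? (pvGood qual limite) =
            ((List.range' 0 i0).find? (pvGood qual limite)).or
              ((List.range' i0 (n - i0)).find? (pvGood qual limite)) := by
          rw [hsplit, List.find?_append]
        rw [hf, hpre_none, Option.none_or] at this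
        exact this.symm
      set g := (List.range' i0 (n - i0)).filter (pvGood qual limite) with hg
      have hghead : g.head? = some i0 := by rw [hg, List.head?_filter, hfind_suf]
      have hgne : g ≠ [] := by intro h; rw [h] at hghead; simp at hghead
      obtain ⟨j, hj⟩ : ∃ j, g.getLast? = some j := by
        rcases hx : g.getLast? with _ | j
        · exact absurd (List.getLast?_eq_none_iff.mp hx) hgne
        · exact ⟨j, rfl⟩
      have hF : pvTrimFim qual limite ((i0 : Int)) (PySem.Str.len seq) = (j : Int) + 1 := by
        rw [hlen]
        have harith : (n : Int) = ((i0 + (n - i0) : Nat) : Int) := by push_cast; omega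
        rw [harith]
        rw [pvTrimFim_eq qual limite (n - i0) i0 (by omega)]
        rw [← hg, hj]
        rfl
      rw [hI, hf]
      simp only [Option.elim]
      rw [hF]
      -- B's branch is the nonempty one: i0 is a good index
      rw [if_neg (by simp; exact ⟨i0, hi0lt, hi0p⟩)]
      rw [hfil]
      -- good[0] = i0, good[-1] = j
      have hhead : (g.map (fun k : Nat => (k : Int))).head? = some ((i0 : Int)) := by
        rw [List.head?_map, hghead]; rfl
      have hlast : (g.map (fun k : Nat => (k : Int))).getLast? = some ((j : Int)) := by
        rw [List.getLast?_map, hj]; rfl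
      have h0get : PySem.List.pyGetD (g.map (fun k : Nat => (k : Int))) 0 0 = (i0 : Int) := by
        have : ((0 : Int)) = ((0 : Nat) : Int) := rfl
        rw [this, PySem.List.pyGetD_natCast]
        rcases hcons : g.map (fun k : Nat => (k : Int)) with _ | ⟨a, t⟩
        · rw [hcons] at hhead; simp at hhead
        · rw [hcons] at hhead; simp at hhead; simp [hhead]
      have hmlen : 1 ≤ (g.map (fun k : Nat => (k : Int))).length := by
        rcases hcons : g.map (fun k : Nat => (k : Int)) with _ | ⟨a, t⟩
        · rw [hcons] at hhead; simp at hhead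
        · simp
      have hneg : PySem.List.pyGetD (g.map (fun k : Nat => (k : Int))) (-1) 0 = (j : Int) := by
        set m := g.map (fun k : Nat => (k : Int)) with hm
        rw [PySem.List.pyGetD, PySem.List.pyGet?, PySem.List.pyIdx?]
        have h1 : ¬ ((0:Int) ≤ -1) := by omega
        have h2 : -(m.length : Int) ≤ -1 := by omega
        rw [if_neg h1, if_pos h2]
        simp only [Option.bind]
        have h3 : m.length - ((-(-1) : Int)).toNat = m.length - 1 := by norm_num
        rw [h3]
        rw [List.getLast?_eq_getElem?] at hlast
        simp [hlast]
      rw [h0get, hneg]
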